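-- pv_equiv track=rewrite | github.com/minnseong/Algorithm | programmers/Test/tossNextChallenge_Q6.py | solution
-- ===== SOURCE A (Python) =====
-- from collections import defaultdict
--
-- def solution(steps_one, names_one, steps_two, names_two, steps_three, names_three):
--     answer = []
--
--     dic = defaultdict(list)
--     check = set()
--
--     for ss, nn in zip([steps_one, steps_two, steps_three], [names_one, names_two, names_three]):
--         check = set()
--         for s, n in zip(ss, nn):
--             if n in check:
--                 dic[n][-1] = max(dic[n][-1], s)
--             else:
--                 dic[n].append(s)
--                 check.add(n)
--
--     for key in dic.keys():
--         dic[key] = sum(dic[key])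
--
--     sd = sorted(dic.items(), key = lambda item: (-item[1], item[0]))
--     for s in sd:
--         answer.append(s[0])
--
--     return answer
-- ===== SOURCE B (Python) =====
-- def solution(steps_one, names_one, steps_two, names_two, steps_three, names_three):
--     rounds = ((steps_one, names_one), (steps_two, names_two), (steps_three, names_three))
--
--     seen = []
--     for ss, nn in rounds:
--         for _, n in zip(ss, nn):
--             if n not in seen:
--                 seen.append(n)
--
--     def total(name):
--         t = 0
--         for ss, nn in rounds:
--             best = None
--             for s, n in zip(ss, nn):
--                 if n == name and (best is None or best < s):
--                     best = s
--             if best is not None: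
--                 t += best
--         return t
--
--     pairs = [(n, total(n)) for n in seen]
--     pairs.sort(key=lambda p: (-p[1], p[0]))
--     return [n for n, _ in pairs]
-- ===== Notes on version B (the rewrite author's own statement) =====
-- stated objective: alternative
-- what changed: B abandons A's streaming dict-of-lists with a [-1] sentinel slot and a membership set: it first collects the distinct names, then computes each name's total by direct nested scans of the three (steps,names) rounds (per-round max found by a plain comparison scan), and finally sorts the (name,total) pairs; no dictionary or set is used at all, trading A's linear aggregation for quadratic nested scans.
import Mathlib
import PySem

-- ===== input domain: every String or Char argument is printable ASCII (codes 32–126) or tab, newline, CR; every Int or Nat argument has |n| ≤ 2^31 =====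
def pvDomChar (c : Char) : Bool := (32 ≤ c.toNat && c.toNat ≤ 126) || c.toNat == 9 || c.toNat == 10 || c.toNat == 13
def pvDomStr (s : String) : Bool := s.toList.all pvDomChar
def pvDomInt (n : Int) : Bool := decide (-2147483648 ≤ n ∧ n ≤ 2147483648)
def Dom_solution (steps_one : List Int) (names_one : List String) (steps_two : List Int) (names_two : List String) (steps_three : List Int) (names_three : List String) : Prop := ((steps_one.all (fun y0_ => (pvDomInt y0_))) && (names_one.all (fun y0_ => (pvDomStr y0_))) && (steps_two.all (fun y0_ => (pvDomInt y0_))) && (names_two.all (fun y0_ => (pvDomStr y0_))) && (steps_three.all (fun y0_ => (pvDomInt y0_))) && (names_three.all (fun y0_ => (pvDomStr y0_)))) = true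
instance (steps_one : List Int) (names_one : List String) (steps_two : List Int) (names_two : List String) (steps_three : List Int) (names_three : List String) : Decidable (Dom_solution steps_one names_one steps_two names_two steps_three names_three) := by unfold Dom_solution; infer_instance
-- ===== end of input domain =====

-- ===== PORT A =====
-- B replaces A's streaming dict-of-lists ([-1] sentinel slot) plus membership set by
-- distinct-name collection followed by direct per-name nested scans; same results.

-- A-side helper: the body of A's inner 'for s, n in zip(ss, nn)' loop.
def pvStepA (st : PySem.Dict String (List Int) × PySem.Set String) (p : Int × String) :
    PySem.Dict String (List Int) × PySem.Set String :=
  if st.2.contains p.2 then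
    -- dic[n][-1] = max(dic[n][-1], s)
    (st.1.insert p.2 (PySem.List.pySetD (st.1.getD p.2 []) (-1)
        (max (PySem.List.pyGetD (st.1.getD p.2 []) (-1) 0) p.1)), st.2)
  else
    -- dic[n].append(s); check.add(n)   (defaultdict(list): missing key reads as [])
    (st.1.insert p.2 (st.1.getD p.2 [] ++ [p.1]), st.2.add p.2)

def solution (steps_one : List Int) (names_one : List String) (steps_two : List Int) (names_two : List String) (steps_three : List Int) (names_three : List String) : List String :=
  let st := [(steps_one, names_one), (steps_two, names_two), (steps_three, names_three)].foldl
      (fun (st : PySem.Dict String (List Int) × PySem.Set String) c =>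
        -- 'check = set()' at the top of each outer iteration, then the inner zip loop
        (c.1.zip c.2).foldl pvStepA (st.1, PySem.Set.empty))
      (PySem.Dict.empty, PySem.Set.empty)
  -- 'for key in dic.keys(): dic[key] = sum(dic[key])' rebinds every value in key order;
  -- the value type changes (list -> int), so in Lean it is the same in-order loop into a fresh dict.
  let sums := st.1.items.foldl (fun (d : PySem.Dict String Int) p => d.insert p.1 p.2.sum) PySem.Dict.empty
  let sd := PySem.List.sorted2 sums.items (fun it => -it.2) (fun it => it.1)
  sd.foldl (fun answer s => answer ++ [s.1]) []

-- ===== PORT B =====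
-- 'if n == name and (best is None or best < s): best = s' — one step of B's inner comparison scan
def pvBestStep (name : String) (best : Option Int) (p : Int × String) : Option Int :=
  match best with
  | none => if p.2 = name then some p.1 else none
  | some b => if p.2 = name ∧ b < p.1 then some p.1 else some b

-- best = None; for s, n in zip(ss, nn): …
def pvBestOf (name : String) (l : List (Int × String)) : Option Int :=
  l.foldl (pvBestStep name) none

-- def total(name): t = 0; for ss, nn in rounds: best = …; if best is not None: t += best
def pvTotalOf (rounds : List (List Int × List String)) (name : String) : Int :=
  rounds.foldl (fun t c =>
    match pvBestOf name (c.1.zip c.2) with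
    | none => t
    | some b => t + b) 0

def solution_alt (steps_one : List Int) (names_one : List String) (steps_two : List Int) (names_two : List String) (steps_three : List Int) (names_three : List String) : List String :=
  let rounds := [(steps_one, names_one), (steps_two, names_two), (steps_three, names_three)]
  -- for ss, nn in rounds: for _, n in zip(ss, nn): if n not in seen: seen.append(n)
  let seen := rounds.foldl
      (fun seen c => (c.1.zip c.2).foldl
        (fun (seen : List String) p => if p.2 ∉ seen then seen ++ [p.2] else seen) seen)
      ([] : List String)
  -- pairs = [(n, total(n)) for n in seen]; pairs.sort(key=lambda p: (-p[1], p[0]))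
  let pairs := PySem.List.sorted2 (seen.map (fun n => (n, pvTotalOf rounds n)))
      (fun p => -p.2) (fun p => p.1)
  pairs.map Prod.fst

-- ===== PRECONDITION & SPEC =====
def Spec_solution (steps_one : List Int) (names_one : List String) (steps_two : List Int) (names_two : List String) (steps_three : List Int) (names_three : List String) (out : List String) : Prop := out = solution_alt steps_one names_one steps_two names_two steps_three names_three
instance (steps_one : List Int) (names_one : List String) (steps_two : List Int) (names_two : List String) (steps_three : List Int) (names_three : List String) (out : List String) : Decidable (Spec_solution steps_one names_one steps_two names_two steps_three names_three out) := by unfold Spec_solution; infer_instance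

-- ===== CLAIM (what is proved, stated in full; the proofs are below) =====
def Claim_equal_solution : Prop := ∀ (steps_one : List Int) (names_one : List String) (steps_two : List Int) (names_two : List String) (steps_three : List Int) (names_three : List String), Dom_solution steps_one names_one steps_two names_two steps_three names_three → Spec_solution steps_one names_one steps_two names_two steps_three names_three (solution steps_one names_one steps_two names_two steps_three names_three)

-- ===== LEMMAS AND PROOFS =====

-- Proof-side model (used by the proofs only): per-round best dict and running totals dict.
def pvBest (ss : List Int) (nn : List String) : PySem.Dict String Int :=
  (ss.zip nn).foldl (fun b p => b.insert p.2 (max (b.getD p.2 p.1) p.1)) PySem.Dict.empty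

def pvAddBest (t b : PySem.Dict String Int) : PySem.Dict String Int :=
  b.items.foldl (fun t p => t.insert p.1 (t.getD p.1 0 + p.2)) t

-- optional total: what the totals dict holds at key n, as an Option fold over the rounds
def pvTotalOpt (rounds : List (List Int × List String)) (name : String) : Option Int :=
  rounds.foldl (fun o c =>
    match pvBestOf name (c.1.zip c.2) with
    | none => o
    | some v => some (o.getD 0 + v)) none

-- Coupling invariant between A's (dic, check) and the model (best, totals) in the middle of one list.
def pvInv (dic : PySem.Dict String (List Int)) (check : PySem.Set String)
    (best totals : PySem.Dict String Int) : Prop :=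
  ∀ n : String,
    (check.contains n = (best.get? n).isSome) ∧
    (best.get? n = none → (dic.get? n).map List.sum = totals.get? n) ∧
    (∀ v, best.get? n = some v → ∃ pre, dic.get? n = some (pre ++ [v]) ∧ pre.sum = totals.getD n 0)

-- Outer invariant between the lists.
def pvOInv (dic : PySem.Dict String (List Int)) (totals : PySem.Dict String Int) : Prop :=
  ∀ n : String, (dic.get? n).map List.sum = totals.get? n

theorem pvSetLast {α : Type} (xs : List α) (x w : α) :
    PySem.List.pySetD (xs ++ [x]) (-1) w = xs ++ [w] := by
  simp [PySem.List.pySetD, PySem.List.pySet?, PySem.List.pyIdx?]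

theorem pvStepA_inv (dic : PySem.Dict String (List Int)) (check : PySem.Set String)
    (best totals : PySem.Dict String Int) (p : Int × String) (h : pvInv dic check best totals) :
    pvInv (pvStepA (dic, check) p).1 (pvStepA (dic, check) p).2
      (best.insert p.2 (max (best.getD p.2 p.1) p.1)) totals := by
  rcases p with ⟨s, m⟩
  by_cases hb : best.get? m = none
  · have hc : check.contains m = false := by rw [(h m).1, hb]; rfl
    have hgd : best.getD m s = s := by rw [PySem.Dict.getD_eq_get?_getD, hb]; rfl
    simp only [pvStepA, hc, Bool.false_eq_true, if_false, hgd, max_self]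
    intro n
    by_cases hn : n = m
    · subst hn
      refine ⟨?_, ?_, ?_⟩
      · rw [PySem.Dict.get?_insert_self, PySem.Set.contains_eq_decide]
        simp [PySem.Set.mem_add]
      · intro hh; rw [PySem.Dict.get?_insert_self] at hh; cases hh
      · intro v hv
        rw [PySem.Dict.get?_insert_self] at hv
        obtain rfl : s = v := by injection hv
        refine ⟨dic.getD n [], by rw [PySem.Dict.get?_insert_self], ?_⟩
        have h2 := (h n).2.1 hb
        cases hdm : dic.get? n with
        | none =>
            rw [hdm] at h2
            rw [PySem.Dict.getD_eq_get?_getD, hdm, PySem.Dict.getD_eq_get?_getD, ← h2]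
            rfl
        | some L =>
            rw [hdm] at h2
            rw [PySem.Dict.getD_eq_get?_getD, hdm, PySem.Dict.getD_eq_get?_getD, ← h2]
            rfl
    · refine ⟨?_, ?_, ?_⟩
      · rw [PySem.Dict.get?_insert_of_ne _ _ hn, PySem.Set.contains_eq_decide,
          ← (h n).1, PySem.Set.contains_eq_decide]
        simp [PySem.Set.mem_add, hn]
      · intro hh
        rw [PySem.Dict.get?_insert_of_ne _ _ hn] at hh
        rw [PySem.Dict.get?_insert_of_ne _ _ hn]
        exact (h n).2.1 hh
      · intro v hv
        rw [PySem.Dict.get?_insert_of_ne _ _ hn] at hv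
        rw [PySem.Dict.get?_insert_of_ne _ _ hn]
        exact (h n).2.2 v hv
  · obtain ⟨v, hv⟩ := Option.ne_none_iff_exists'.mp hb
    have hc : check.contains m = true := by rw [(h m).1, hv]; rfl
    obtain ⟨pre, hpre, hsum⟩ := (h m).2.2 v hv
    have hgdl : dic.getD m [] = pre ++ [v] := by
      rw [PySem.Dict.getD_eq_get?_getD, hpre]; rfl
    have hgd : best.getD m s = v := by rw [PySem.Dict.getD_eq_get?_getD, hv]; rfl
    simp only [pvStepA, hc, if_true, hgd, hgdl,
      PySem.List.pyGetD_neg_one_append_singleton, pvSetLast]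
    intro n
    by_cases hn : n = m
    · subst hn
      refine ⟨?_, ?_, ?_⟩
      · rw [PySem.Dict.get?_insert_self, hc]; rfl
      · intro hh; rw [PySem.Dict.get?_insert_self] at hh; cases hh
      · intro w hw
        rw [PySem.Dict.get?_insert_self] at hw
        obtain rfl : max v s = w := by injection hw
        exact ⟨pre, by rw [PySem.Dict.get?_insert_self], hsum⟩
    · refine ⟨?_, ?_, ?_⟩
      · rw [PySem.Dict.get?_insert_of_ne _ _ hn]; exact (h n).1
      · intro hh
        rw [PySem.Dict.get?_insert_of_ne _ _ hn] at hh
        rw [PySem.Dict.get?_insert_of_ne _ _ hn]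
        exact (h n).2.1 hh
      · intro w hw
        rw [PySem.Dict.get?_insert_of_ne _ _ hn] at hw
        rw [PySem.Dict.get?_insert_of_ne _ _ hn]
        exact (h n).2.2 w hw

theorem pvChunk_inv (l : List (Int × String)) (dic : PySem.Dict String (List Int))
    (check : PySem.Set String) (best totals : PySem.Dict String Int)
    (h : pvInv dic check best totals) :
    pvInv (l.foldl pvStepA (dic, check)).1 (l.foldl pvStepA (dic, check)).2
      (l.foldl (fun b p => b.insert p.2 (max (b.getD p.2 p.1) p.1)) best) totals := by
  induction l generalizing dic check best with
  | nil => exact h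
  | cons p l ih =>
      have h1 := pvStepA_inv dic check best totals p h
      simpa using ih (pvStepA (dic, check) p).1 (pvStepA (dic, check) p).2 _ h1

theorem pvAdd_preserve (l : List (String × Int)) (t : PySem.Dict String Int) (n : String)
    (h : ∀ p ∈ l, p.1 ≠ n) :
    (l.foldl (fun t p => t.insert p.1 (t.getD p.1 0 + p.2)) t).get? n = t.get? n := by
  induction l generalizing t with
  | nil => rfl
  | cons p l ih =>
      simp only [List.foldl_cons]
      rw [ih _ (fun q hq => h q (List.mem_cons_of_mem _ hq)),
        PySem.Dict.get?_insert_of_ne _ _ (Ne.symm (h p List.mem_cons_self))]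

theorem pvAddBest_get? (t b : PySem.Dict String Int) (hnd : b.keys.Nodup) (n : String) :
    (pvAddBest t b).get? n =
      match b.get? n with
      | none => t.get? n
      | some v => some (t.getD n 0 + v) := by
  have hnd' : (b.items.map Prod.fst).Nodup := by simpa [PySem.Dict.keys] using hnd
  cases hb : b.get? n with
  | none =>
      have hnk : n ∉ b.items.map Prod.fst := by
        have := (PySem.Dict.get?_eq_none_iff_not_mem_keys b n).mp hb
        simpa [PySem.Dict.keys] using this
      exact pvAdd_preserve b.items t n
        (fun p hp hpn => hnk (by rw [← hpn]; exact List.mem_map_of_mem hp))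
  | some v =>
      have hmem : (n, v) ∈ b.items := PySem.Dict.mem_items_of_get?_eq_some b hb
      obtain ⟨l₁, l₂, heq⟩ := List.append_of_mem hmem
      unfold pvAddBest
      rw [heq] at hnd' ⊢
      have hmap : (l₁.map Prod.fst ++ n :: l₂.map Prod.fst).Nodup := by simpa using hnd'
      have h12 : n ∉ l₁.map Prod.fst ∧ n ∉ l₂.map Prod.fst := by
        simp only [List.nodup_append, List.nodup_cons] at hmap
        exact ⟨fun hx => hmap.2.2 n hx n (by simp) rfl, hmap.2.1.1⟩
      obtain ⟨h1, h2⟩ := h12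
      have e1 : ∀ p ∈ l₁, p.1 ≠ n :=
        fun p hp hpn => h1 (by rw [← hpn]; exact List.mem_map_of_mem hp)
      have e2 : ∀ p ∈ l₂, p.1 ≠ n :=
        fun p hp hpn => h2 (by rw [← hpn]; exact List.mem_map_of_mem hp)
      rw [List.foldl_append, List.foldl_cons]
      have g1 := pvAdd_preserve l₁ t n e1
      rw [pvAdd_preserve l₂ _ n e2]
      show ((l₁.foldl _ t).insert n (_ + v)).get? n = _
      rw [PySem.Dict.get?_insert_self, PySem.Dict.getD_eq_get?_getD, g1,
        ← PySem.Dict.getD_eq_get?_getD]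

theorem pvNodup_stepA (l : List (Int × String)) (dic : PySem.Dict String (List Int))
    (check : PySem.Set String) (h : dic.keys.Nodup) :
    ((l.foldl pvStepA (dic, check)).1).keys.Nodup := by
  induction l generalizing dic check with
  | nil => exact h
  | cons p l ih =>
      simp only [List.foldl_cons]
      have : ∃ v c, pvStepA (dic, check) p = (dic.insert p.2 v, c) := by
        unfold pvStepA; split <;> exact ⟨_, _, rfl⟩
      obtain ⟨v, c, hv⟩ := this
      rw [hv]
      exact ih _ _ (PySem.Dict.nodup_keys_insert _ _ _ h)

theorem pvBest_nodup (ss : List Int) (nn : List String) : (pvBest ss nn).keys.Nodup :=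
  PySem.Dict.nodup_keys_foldl_insert_key (ss.zip nn) Prod.snd
    (fun b p => max (b.getD p.2 p.1) p.1) PySem.Dict.empty (by simp [PySem.Dict.keys_empty])

-- One outer iteration preserves the outer invariant and key uniqueness.
theorem pvChunk_outer (ss : List Int) (nn : List String)
    (dic : PySem.Dict String (List Int)) (totals : PySem.Dict String Int)
    (h : pvOInv dic totals) (hd : dic.keys.Nodup) (ht : totals.keys.Nodup) :
    pvOInv ((ss.zip nn).foldl pvStepA (dic, PySem.Set.empty)).1
        (pvAddBest totals (pvBest ss nn)) ∧
      (((ss.zip nn).foldl pvStepA (dic, PySem.Set.empty)).1).keys.Nodup ∧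
      (pvAddBest totals (pvBest ss nn)).keys.Nodup := by
  have hinit : pvInv dic PySem.Set.empty PySem.Dict.empty totals := by
    intro n
    refine ⟨?_, fun _ => h n, fun v hv => by simp [PySem.Dict.get?_empty] at hv⟩
    rw [PySem.Set.contains_eq_decide]
    simp [PySem.Set.empty, PySem.Dict.get?_empty]
  have hI := pvChunk_inv (ss.zip nn) dic PySem.Set.empty PySem.Dict.empty totals hinit
  have hbest : pvBest ss nn =
      (ss.zip nn).foldl (fun b p => b.insert p.2 (max (b.getD p.2 p.1) p.1)) PySem.Dict.empty := rfl
  have hbn : (pvBest ss nn).keys.Nodup := pvBest_nodup ss nn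
  refine ⟨?_, pvNodup_stepA _ _ _ hd, ?_⟩
  · intro n
    rw [pvAddBest_get? totals (pvBest ss nn) hbn n]
    cases hb : (pvBest ss nn).get? n with
    | none =>
        have h2 := (hI n).2.1 (by rw [← hbest]; exact hb)
        simpa using h2
    | some v =>
        obtain ⟨pre, hpre, hsum⟩ := (hI n).2.2 v (by rw [← hbest]; exact hb)
        simp only [hpre, Option.map_some, List.sum_append, List.sum_cons, List.sum_nil, hsum]
        simp [add_zero]
  · exact PySem.Dict.nodup_keys_foldl_insert_key (pvBest ss nn).items Prod.fst
      (fun t p => t.getD p.1 0 + p.2) totals ht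

theorem pvSums_get? (dic : PySem.Dict String (List Int)) (hd : dic.keys.Nodup) :
    (dic.items.foldl (fun (d : PySem.Dict String Int) p => d.insert p.1 p.2.sum) PySem.Dict.empty).items
        = dic.items.map (fun p => (p.1, p.2.sum)) := by
  simpa using PySem.Dict.items_foldl_insert_fresh dic.items Prod.fst (fun p => p.2.sum)
    PySem.Dict.empty (by intro a _; simp) hd

theorem pvPerm_of_get?_eq (d e : PySem.Dict String Int) (hd : d.keys.Nodup) (he : e.keys.Nodup)
    (h : ∀ n, d.get? n = e.get? n) : d.items.Perm e.items := by
  have hd' : d.items.Nodup := List.Nodup.of_map Prod.fst hd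
  have he' : e.items.Nodup := List.Nodup.of_map Prod.fst he
  rw [List.perm_ext_iff_of_nodup hd' he']
  intro a
  rw [← PySem.Dict.get?_eq_some_iff_mem_items d a.1 a.2 hd,
    ← PySem.Dict.get?_eq_some_iff_mem_items e a.1 a.2 he, h]

theorem pvSorted2_eq_sorted (xs : List (String × Int)) :
    PySem.List.sorted2 xs (fun it => -it.2) (fun it => it.1) =
      PySem.List.sorted xs (fun it => toLex (-it.2, it.1)) := by
  show List.foldl (fun acc x => PySem.List.insertBy _ x acc) [] xs =
    List.foldl (fun acc x => PySem.List.insertBy _ x acc) [] xs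
  congr 1
  funext acc p
  congr 1
  funext a b
  rcases lt_trichotomy (-(a.2) : Int) (-(b.2)) with h | h | h
  · simp [Prod.Lex.lt_iff, h, not_lt_of_gt h]
  · simp [Prod.Lex.lt_iff, h]
  · have h1 : a.2 < b.2 := by omega
    have h2 : ¬ (a.2 = b.2) := by omega
    simp [Prod.Lex.lt_iff, not_lt_of_gt h, h1, h2]

theorem pvSorted2_congr (xs ys : List (String × Int)) (h : xs.Perm ys) :
    PySem.List.sorted2 xs (fun it => -it.2) (fun it => it.1) =
      PySem.List.sorted2 ys (fun it => -it.2) (fun it => it.1) := by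
  rw [pvSorted2_eq_sorted, pvSorted2_eq_sorted]
  refine PySem.List.sorted_eq_sorted_of_perm xs ys _ ?_ h
  intro p q hpq
  have h1 : (-p.2, p.1) = (-q.2, q.1) := by simpa [toLex] using hpq
  have h2 : p.2 = q.2 := by have := congrArg Prod.fst h1; simpa using this
  have h3 : p.1 = q.1 := congrArg Prod.snd h1
  exact Prod.ext h3 h2

theorem pvFinal (D : PySem.Dict String (List Int)) (T : PySem.Dict String Int)
    (h : pvOInv D T) (hD : D.keys.Nodup) (hT : T.keys.Nodup) :
    PySem.List.sorted2
        (D.items.foldl (fun (d : PySem.Dict String Int) p => d.insert p.1 p.2.sum)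
          PySem.Dict.empty).items (fun it => -it.2) (fun it => it.1) =
      PySem.List.sorted2 T.items (fun it => -it.2) (fun it => it.1) := by
  set S := D.items.foldl (fun (d : PySem.Dict String Int) p => d.insert p.1 p.2.sum)
    PySem.Dict.empty with hS
  have hitems : S.items = D.items.map (fun p => (p.1, p.2.sum)) := pvSums_get? D hD
  have hkeys : S.keys = D.keys := by
    simp [PySem.Dict.keys, hitems, Function.comp]
  have hSn : S.keys.Nodup := hkeys ▸ hD
  have hget : ∀ n, S.get? n = T.get? n := by
    intro n
    cases hdn : D.get? n with
    | none =>
        have h1 : n ∉ D.keys := (PySem.Dict.get?_eq_none_iff_not_mem_keys D n).mp hdn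
        have h2 : S.get? n = none :=
          (PySem.Dict.get?_eq_none_iff_not_mem_keys S n).mpr (hkeys ▸ h1)
        have h3 := h n
        rw [hdn] at h3
        simp only [Option.map_none] at h3
        rw [h2]; exact h3
    | some L =>
        have hm : (n, L) ∈ D.items := PySem.Dict.mem_items_of_get?_eq_some D hdn
        have hm2 : (n, L.sum) ∈ S.items := by
          rw [hitems]; exact List.mem_map_of_mem hm
        have h2 : S.get? n = some L.sum := PySem.Dict.get?_of_mem_items S hm2 hSn
        have h3 := h n
        rw [hdn] at h3
        simp only [Option.map_some] at h3
        rw [h2]; exact h3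
  exact pvSorted2_congr _ _ (pvPerm_of_get?_eq S T hSn hT hget)

-- ===== bridging the model totals dict to B's per-name scans =====

theorem pvBestStep_get? (p : Int × String) (b : PySem.Dict String Int) (n : String) :
    (b.insert p.2 (max (b.getD p.2 p.1) p.1)).get? n = pvBestStep n (b.get? n) p := by
  by_cases h : p.2 = n
  · subst h
    rw [PySem.Dict.get?_insert_self]
    cases hb : b.get? p.2 with
    | none => simp [pvBestStep, PySem.Dict.getD_eq_get?_getD, hb]
    | some v =>
        simp only [pvBestStep, PySem.Dict.getD_eq_get?_getD, hb, Option.getD_some]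
        by_cases hlt : v < p.1
        · simp [hlt, max_eq_right (le_of_lt hlt)]
        · simp [hlt, max_eq_left (not_lt.mp hlt)]
  · rw [PySem.Dict.get?_insert_of_ne _ _ (fun e => h e.symm)]
    cases b.get? n <;> simp [pvBestStep, h]

theorem pvBest_foldl_get? (l : List (Int × String)) (b : PySem.Dict String Int) (n : String) :
    (l.foldl (fun b p => b.insert p.2 (max (b.getD p.2 p.1) p.1)) b).get? n
      = l.foldl (pvBestStep n) (b.get? n) := by
  induction l generalizing b with
  | nil => rfl
  | cons p l ih => simp only [List.foldl_cons]; rw [ih, pvBestStep_get?]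

theorem pvBest_get? (ss : List Int) (nn : List String) (n : String) :
    (pvBest ss nn).get? n = pvBestOf n (ss.zip nn) := by
  unfold pvBest pvBestOf
  rw [pvBest_foldl_get?, PySem.Dict.get?_empty]

theorem pvTotals_get? (rounds : List (List Int × List String)) (t : PySem.Dict String Int)
    (n : String) :
    (rounds.foldl (fun t c => pvAddBest t (pvBest c.1 c.2)) t).get? n
      = rounds.foldl (fun o c =>
          match pvBestOf n (c.1.zip c.2) with
          | none => o
          | some v => some (o.getD 0 + v)) (t.get? n) := by
  induction rounds generalizing t with
  | nil => rfl
  | cons c rs ih =>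
      simp only [List.foldl_cons]
      rw [ih]
      congr 1
      rw [pvAddBest_get? t (pvBest c.1 c.2) (pvBest_nodup c.1 c.2) n, pvBest_get?]
      cases pvBestOf n (c.1.zip c.2) <;> simp [PySem.Dict.getD_eq_get?_getD]

theorem pvTotalOf_eq_opt (rounds : List (List Int × List String)) (n : String)
    (t : Int) (o : Option Int) (h : o.getD 0 = t) :
    rounds.foldl (fun t c =>
        match pvBestOf n (c.1.zip c.2) with
        | none => t
        | some b => t + b) t
      = (rounds.foldl (fun o c =>
          match pvBestOf n (c.1.zip c.2) with
          | none => o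
          | some v => some (o.getD 0 + v)) o).getD 0 := by
  induction rounds generalizing t o with
  | nil => simpa using h.symm
  | cons c rs ih =>
      simp only [List.foldl_cons]
      cases pvBestOf n (c.1.zip c.2) with
      | none => exact ih t o h
      | some v => exact ih (t + v) (some (o.getD 0 + v)) (by simp [h])

theorem pvBestStep_isSome (n : String) (o : Option Int) (p : Int × String) :
    (pvBestStep n o p).isSome = (o.isSome || (p.2 == n)) := by
  cases o with
  | none => by_cases h : p.2 = n <;> simp [pvBestStep, h]
  | some b => by_cases h : p.2 = n ∧ b < p.1 <;> simp [pvBestStep, h]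

theorem pvBestOf_foldl_isSome (l : List (Int × String)) (n : String) (o : Option Int) :
    (l.foldl (pvBestStep n) o).isSome = (o.isSome || l.any (fun p => p.2 == n)) := by
  induction l generalizing o with
  | nil => simp
  | cons p l ih =>
      simp only [List.foldl_cons, List.any_cons]
      rw [ih, pvBestStep_isSome, Bool.or_assoc]

theorem pvTotalOpt_isSome (rounds : List (List Int × List String)) (n : String) (o : Option Int) :
    (rounds.foldl (fun o c =>
        match pvBestOf n (c.1.zip c.2) with
        | none => o
        | some v => some (o.getD 0 + v)) o).isSome
      = (o.isSome || rounds.any (fun c => (pvBestOf n (c.1.zip c.2)).isSome)) := by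
  induction rounds generalizing o with
  | nil => simp
  | cons c rs ih =>
      simp only [List.foldl_cons, List.any_cons]
      cases hb : pvBestOf n (c.1.zip c.2) with
      | none => rw [ih]; simp
      | some v => rw [ih]; simp

theorem pvSeen_mem_aux (l : List (Int × String)) (seen : List String) (n : String) :
    n ∈ l.foldl (fun (seen : List String) p => if p.2 ∉ seen then seen ++ [p.2] else seen) seen
      ↔ n ∈ seen ∨ ∃ p ∈ l, p.2 = n := by
  induction l generalizing seen with
  | nil => simp
  | cons p l ih =>
      simp only [List.foldl_cons, ih, List.mem_cons]
      by_cases h : p.2 ∈ seen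
      · rw [if_neg (by simpa using h)]
        constructor
        · rintro (hn | hx)
          · exact Or.inl hn
          · exact Or.inr ⟨hx.choose, Or.inr hx.choose_spec.1, hx.choose_spec.2⟩
        · rintro (hn | ⟨q, hq | hq, hqn⟩)
          · exact Or.inl hn
          · exact Or.inl (by rw [← hqn, hq]; exact h)
          · exact Or.inr ⟨q, hq, hqn⟩
      · rw [if_pos (by simpa using h)]
        simp only [List.mem_append, List.mem_singleton]
        constructor
        · rintro ((hn | hn) | hx)
          · exact Or.inl hn
          · exact Or.inr ⟨p, Or.inl rfl, hn.symm⟩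
          · exact Or.inr ⟨hx.choose, Or.inr hx.choose_spec.1, hx.choose_spec.2⟩
        · rintro (hn | ⟨q, hq | hq, hqn⟩)
          · exact Or.inl (Or.inl hn)
          · exact Or.inl (Or.inr (by rw [← hqn, hq]))
          · exact Or.inr ⟨q, hq, hqn⟩

theorem pvSeen_nodup_aux (l : List (Int × String)) (seen : List String) (h : seen.Nodup) :
    (l.foldl (fun (seen : List String) p => if p.2 ∉ seen then seen ++ [p.2] else seen) seen).Nodup := by
  induction l generalizing seen with
  | nil => exact h
  | cons p l ih =>
      simp only [List.foldl_cons]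
      by_cases hm : p.2 ∈ seen
      · rw [if_neg (by simpa using hm)]; exact ih seen h
      · rw [if_pos (by simpa using hm)]
        refine ih _ ?_
        rw [List.nodup_append]
        refine ⟨h, List.nodup_singleton _, ?_⟩
        intro a ha b hb hab
        rw [List.mem_singleton] at hb
        exact hm (by rw [← hb, ← hab]; exact ha)

theorem pvSeenR_mem (rounds : List (List Int × List String)) (seen : List String) (n : String) :
    n ∈ rounds.foldl
        (fun seen c => (c.1.zip c.2).foldl
          (fun (seen : List String) p => if p.2 ∉ seen then seen ++ [p.2] else seen) seen) seen
      ↔ n ∈ seen ∨ ∃ c ∈ rounds, ∃ p ∈ c.1.zip c.2, p.2 = n := by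
  induction rounds generalizing seen with
  | nil => simp
  | cons c rs ih =>
      simp only [List.foldl_cons, ih, pvSeen_mem_aux, List.mem_cons]
      constructor
      · rintro ((hn | hx) | hy)
        · exact Or.inl hn
        · exact Or.inr ⟨c, Or.inl rfl, hx⟩
        · exact Or.inr ⟨hy.choose, Or.inr hy.choose_spec.1, hy.choose_spec.2⟩
      · rintro (hn | ⟨d, hd | hd, hdp⟩)
        · exact Or.inl (Or.inl hn)
        · exact Or.inl (Or.inr (hd ▸ hdp))
        · exact Or.inr ⟨d, hd, hdp⟩

theorem pvSeenR_nodup (rounds : List (List Int × List String)) (seen : List String)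
    (h : seen.Nodup) :
    (rounds.foldl
        (fun seen c => (c.1.zip c.2).foldl
          (fun (seen : List String) p => if p.2 ∉ seen then seen ++ [p.2] else seen) seen) seen).Nodup := by
  induction rounds generalizing seen with
  | nil => exact h
  | cons c rs ih => exact ih _ (pvSeen_nodup_aux _ _ h)

theorem pvTotals_nodup (rounds : List (List Int × List String)) (t : PySem.Dict String Int)
    (h : t.keys.Nodup) :
    (rounds.foldl (fun t c => pvAddBest t (pvBest c.1 c.2)) t).keys.Nodup := by
  induction rounds generalizing t with
  | nil => exact h
  | cons c rs ih =>
      simp only [List.foldl_cons]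
      exact ih _ (PySem.Dict.nodup_keys_foldl_insert_key (pvBest c.1 c.2).items Prod.fst
        (fun t p => t.getD p.1 0 + p.2) t h)

-- The totals dict's items are a rearrangement of B's (name, total) pairs.
theorem pvPairs_perm (rounds : List (List Int × List String)) :
    ((rounds.foldl (fun t c => pvAddBest t (pvBest c.1 c.2)) PySem.Dict.empty).items).Perm
      ((rounds.foldl
          (fun seen c => (c.1.zip c.2).foldl
            (fun (seen : List String) p => if p.2 ∉ seen then seen ++ [p.2] else seen) seen)
          ([] : List String)).map (fun n => (n, pvTotalOf rounds n))) := by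
  set T := rounds.foldl (fun t c => pvAddBest t (pvBest c.1 c.2)) PySem.Dict.empty with hT
  set seen := rounds.foldl
      (fun seen c => (c.1.zip c.2).foldl
        (fun (seen : List String) p => if p.2 ∉ seen then seen ++ [p.2] else seen) seen)
      ([] : List String) with hseen
  have hTn : T.keys.Nodup := pvTotals_nodup rounds PySem.Dict.empty (by simp [PySem.Dict.keys_empty])
  have hTi : T.items.Nodup := List.Nodup.of_map Prod.fst hTn
  have hsn : seen.Nodup := pvSeenR_nodup rounds [] List.nodup_nil
  have hpn : (seen.map (fun n => (n, pvTotalOf rounds n))).Nodup :=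
    hsn.map (fun a b hab => congrArg Prod.fst hab)
  have hTget : ∀ n, T.get? n = pvTotalOpt rounds n := by
    intro n
    rw [hT, pvTotals_get?, PySem.Dict.get?_empty]
    rfl
  have hmemseen : ∀ n, n ∈ seen ↔ (pvTotalOpt rounds n).isSome = true := by
    intro n
    rw [hseen, pvSeenR_mem]
    unfold pvTotalOpt
    rw [pvTotalOpt_isSome]
    simp only [Option.isSome_none, Bool.false_or, List.any_eq_true]
    constructor
    · rintro (hn | ⟨c, hc, p, hp, hpn⟩)
      · cases hn
      · refine ⟨c, hc, ?_⟩
        unfold pvBestOf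
        rw [pvBestOf_foldl_isSome]
        simp only [Option.isSome_none, Bool.false_or, List.any_eq_true]
        exact ⟨p, hp, by simp [hpn]⟩
    · rintro ⟨c, hc, hb⟩
      unfold pvBestOf at hb
      rw [pvBestOf_foldl_isSome] at hb
      simp only [Option.isSome_none, Bool.false_or, List.any_eq_true, beq_iff_eq] at hb
      exact Or.inr ⟨c, hc, hb.choose, hb.choose_spec.1, hb.choose_spec.2⟩
  have htotal : ∀ n, pvTotalOf rounds n = (pvTotalOpt rounds n).getD 0 :=
    fun n => pvTotalOf_eq_opt rounds n 0 none rfl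
  rw [List.perm_ext_iff_of_nodup hTi hpn]
  rintro ⟨k, v⟩
  rw [← PySem.Dict.get?_eq_some_iff_mem_items T k v hTn, hTget]
  simp only [List.mem_map, Prod.mk.injEq]
  constructor
  · intro hkv
    refine ⟨k, (hmemseen k).mpr (by rw [hkv]; rfl), rfl, ?_⟩
    rw [htotal, hkv]
    rfl
  · rintro ⟨m, hm, rfl, rfl⟩
    obtain ⟨w, hw⟩ := Option.isSome_iff_exists.mp ((hmemseen m).mp hm)
    rw [hw, htotal, hw]
    rfl

-- ===== VERDICT (by name: the statement is the Claim_ definition above) =====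
theorem solution_spec : Claim_equal_solution := by
  intro s1 n1 s2 n2 s3 n3 _
  unfold Spec_solution solution solution_alt
  simp only [List.foldl_cons, List.foldl_nil]
  have h0 : pvOInv PySem.Dict.empty PySem.Dict.empty := by
    intro n; simp [PySem.Dict.get?_empty]
  have hk0 : (PySem.Dict.empty : PySem.Dict String (List Int)).keys.Nodup := by
    simp [PySem.Dict.keys_empty]
  have hk0' : (PySem.Dict.empty : PySem.Dict String Int).keys.Nodup := by
    simp [PySem.Dict.keys_empty]
  obtain ⟨hI1, hD1, hT1⟩ := pvChunk_outer s1 n1 PySem.Dict.empty PySem.Dict.empty h0 hk0 hk0'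
  obtain ⟨hI2, hD2, hT2⟩ := pvChunk_outer s2 n2 _ _ hI1 hD1 hT1
  obtain ⟨hI3, hD3, hT3⟩ := pvChunk_outer s3 n3 _ _ hI2 hD2 hT2
  have hperm := pvPairs_perm [(s1, n1), (s2, n2), (s3, n3)]
  simp only [List.foldl_cons, List.foldl_nil] at hperm
  rw [PySem.List.foldl_append_singleton_eq_map (fun s : String × Int => s.1), List.nil_append,
    pvFinal _ _ hI3 hD3 hT3, pvSorted2_congr _ _ hperm]
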